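-- pv_equiv track=rewrite | github.com/alstjrdlzz/BOJ | 백준/Gold/13549. 숨바꼭질 3/숨바꼭질 3.py | bfs
-- ===== SOURCE A (Python) =====
-- from collections import deque
--
-- def bfs(s, e):
--     q = deque([])
--     v = [-1] * 100001
--
--     q.append(s)
--     v[s] = 0
--
--     while q:
--         c = q.popleft()
--         if c == e:
--             return v[c]
--
--         for n in [2 * c, c - 1, c + 1]:
--             if 0 <= n < 100001 and v[n] == -1:
--                 if n == 2 * c:
--                     q.appendleft(n)
--                     v[n] = v[c]
--                 else:
--                     q.append(n)
--                     v[n] = v[c] + 1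
-- ===== SOURCE B (Python) =====
-- def bfs(s, e):
--     # 0-1 BFS with the 0-cost doubling chains walked inline by an inner loop:
--     # a plain FIFO of (node, distance) pairs plus boolean visited flags replace
--     # A's deque-with-appendleft and its distance-label array.
--     visited = bytearray(100001)
--     visited[s] = 1
--     q = [(s, 0)]
--     head = 0
--     while head < len(q):
--         c, d = q[head]
--         head += 1
--         x = c
--         while True:
--             if x == e:
--                 return d
--             n2 = 2 * x
--             chain = 0 <= n2 < 100001 and not visited[n2]
--             if chain:
--                 visited[n2] = 1
--             for n in (x - 1, x + 1):
--                 if 0 <= n < 100001 and not visited[n]: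
--                     visited[n] = 1
--                     q.append((n, d + 1))
--             if not chain:
--                 break
--             x = n2
--     return None
-- ===== Notes on version B (the rewrite author's own statement) =====
-- stated objective: alternative
-- what changed: The 0-cost doubling chains are walked inline by an inner loop, so a plain FIFO of (node, distance) pairs plus boolean visited flags replace A's deque-with-appendleft and its distance-label array.
-- outside the precondition, e.g. on bfs(-5, -5): A returns 0, B returns 0; on bfs(-1, 3): A returns 3, B returns 3; on bfs(0, 100001): A returns None, B returns None
import Mathlib
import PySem

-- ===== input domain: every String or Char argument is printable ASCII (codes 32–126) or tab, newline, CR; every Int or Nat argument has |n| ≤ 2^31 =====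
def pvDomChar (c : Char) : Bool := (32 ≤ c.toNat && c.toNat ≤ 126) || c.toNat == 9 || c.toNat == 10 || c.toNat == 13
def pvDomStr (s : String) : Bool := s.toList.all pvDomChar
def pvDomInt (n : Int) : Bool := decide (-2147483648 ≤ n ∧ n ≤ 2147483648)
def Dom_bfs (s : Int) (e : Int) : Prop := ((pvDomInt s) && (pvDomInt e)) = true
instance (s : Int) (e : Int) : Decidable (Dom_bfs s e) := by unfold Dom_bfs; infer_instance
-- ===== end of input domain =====

-- B rewrites A's 0-1 BFS so the 0-cost doubling chains are walked inline by an inner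
-- loop: a plain FIFO of (node, distance) pairs plus boolean visited flags replace the
-- deque-with-appendleft and its distance-label array (alternative structure, same cost).

-- ===== PORT A =====
-- v[n] read (all reads are guarded non-negative and in range inside Pre_bfs)
def pvGetI (v : Array Int) (n : Int) : Int := v.getD n.toNat (-1)
-- v[n] = x  (total form; all writes are in range inside Pre_bfs)
def pvSetI (v : Array Int) (n : Int) (x : Int) : Array Int :=
  if h : n.toNat < v.size then v.set n.toNat x h else v
-- '0 <= n < 100001 and v[n] == -1'
def pvOkA (v : Array Int) (n : Int) : Bool :=
  decide (0 ≤ n) && decide (n < 100001) && (pvGetI v n == -1)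
-- one turn of A's 'for n in [...]' body: push n (marking it with label lbl) if unvisited
def pvPushA (v : Array Int) (n lbl : Int) : List Int × Array Int :=
  if pvOkA v n then ([n], pvSetI v n lbl) else ([], v)

-- A's while loop; 2*c is pushed to the FRONT with label v[c], c∓1 to the back with v[c]+1.
-- The fuel only makes the recursion structural: 1000000 far exceeds the ≤ 100002
-- iterations any run can make (each pushed node flips one of the 100001 cells off -1).
def bfsLoop (e : Int) : Nat → List Int → Array Int → Int
  | 0, _, _ => 0                -- fuel guard, never reached
  | _ + 1, [], _ => 0           -- queue exhausted: Python returns None; outside Pre_bfs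
  | fuel + 1, c :: rest, v =>
      let d := pvGetI v c
      if c == e then d
      else
        let f  := pvPushA v (2*c) d
        let a1 := pvPushA f.2 (c-1) (d+1)
        let a2 := pvPushA a1.2 (c+1) (d+1)
        bfsLoop e fuel (f.1 ++ rest ++ a1.1 ++ a2.1) a2.2

def bfs (s : Int) (e : Int) : Int :=
  -- v = [-1]*100001; v[s] = 0 (s outside [-100001,100000] raises IndexError in Python,
  -- and negative s wraps around: both are outside Pre_bfs); q = deque([s])
  bfsLoop e 1000000 [s] (pvSetI (Array.replicate 100001 (-1)) s 0)

-- ===== PORT B =====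
-- 'visited[n]' of the bytearray (all reads are guarded in range inside Pre_bfs)
def pvVis (vis : Array Bool) (n : Int) : Bool := vis.getD n.toNat false
-- 'visited[n] = 1'
def pvMark (vis : Array Bool) (n : Int) : Array Bool :=
  if h : n.toNat < vis.size then vis.set n.toNat true h else vis
-- '0 <= n < 100001 and not visited[n]'
def pvOkB (vis : Array Bool) (n : Int) : Bool :=
  decide (0 ≤ n) && decide (n < 100001) && !(pvVis vis n)
-- one turn of Source B's 'for n in (x - 1, x + 1)' body: mark n and queue (n, lbl)
def pvPushB (vis : Array Bool) (n lbl : Int) : List (Int × Int) × Array Bool :=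
  if pvOkB vis n then ([(n, lbl)], pvMark vis n) else ([], vis)

-- Source B's nested loops: one bfsChain step is one turn of the inner 'while True' walking
-- the doubling chain of x at distance d; when the chain breaks, the next FIFO pair is
-- popped. Same fuel discipline as bfsLoop (one unit per inner turn), never exhausted.
def bfsChain (e : Int) : Nat → Int → Int → List (Int × Int) → Array Bool → Int
  | 0, _, _, _, _ => 0          -- fuel guard, never reached
  | fuel + 1, x, d, rest, vis =>
      if x == e then d
      else
        let chainOk := pvOkB vis (2*x)
        let vis1 := if chainOk then pvMark vis (2*x) else vis
        let p1 := pvPushB vis1 (x-1) (d+1)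
        let p2 := pvPushB p1.2 (x+1) (d+1)
        if chainOk then bfsChain e fuel (2*x) d (rest ++ p1.1 ++ p2.1) p2.2
        else
          match rest ++ p1.1 ++ p2.1 with
          | [] => 0               -- FIFO exhausted: Python returns None; outside Pre_bfs
          | (c, dc) :: r => bfsChain e fuel c dc r p2.2

def bfs_alt (s : Int) (e : Int) : Int :=
  -- visited = bytearray(100001); visited[s] = 1; q = [(s, 0)], and the first pop of the
  -- outer while loop immediately starts the chain walk at (s, 0) with an empty FIFO
  bfsChain e 1000000 s 0 [] (pvMark (Array.replicate 100001 false) s)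

-- ===== PRECONDITION & SPEC =====
-- Pre_bfs restricts to the problem's natural domain 0 ≤ s, e ≤ 100000: outside it A
-- raises IndexError (s > 100000 or s < -100001), or returns None — not an int — whenever
-- e is unreachable, and the few values it does return for negative s rest on accidental
-- negative-index wraparound of the label array.
def Pre_bfs (s : Int) (e : Int) : Prop := 0 ≤ s ∧ s ≤ 100000 ∧ 0 ≤ e ∧ e ≤ 100000
instance (s : Int) (e : Int) : Decidable (Pre_bfs s e) := by unfold Pre_bfs; infer_instance
def pvWitness_bfs : Int × Int := (5, 14)

def Spec_bfs (s : Int) (e : Int) (out : Int) : Prop := out = bfs_alt s e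
instance (s : Int) (e : Int) (out : Int) : Decidable (Spec_bfs s e out) := by unfold Spec_bfs; infer_instance

-- ===== CLAIM (what is proved, stated in full; the proofs are below) =====
def Claim_equal_bfs : Prop := ∀ (s : Int) (e : Int), Dom_bfs s e → Pre_bfs s e → Spec_bfs s e (bfs s e)

-- ===== LEMMAS AND PROOFS =====

-- the visited flags of B agree with the non-(-1) cells of A's label array
def pvRel (v : Array Int) (vis : Array Bool) : Prop :=
  v.size = 100001 ∧ vis.size = 100001 ∧
  (∀ n : Int, 0 ≤ n → n < 100001 → (pvVis vis n = true ↔ pvGetI v n ≠ -1))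

-- every queued node is in range with a non-negative label
def pvQInv (q : List Int) (v : Array Int) : Prop :=
  ∀ c ∈ q, 0 ≤ c ∧ c < 100001 ∧ 0 ≤ pvGetI v c

lemma pvGetI_setI_self (v : Array Int) (n x : Int) (h0 : 0 ≤ n) (h1 : n < (v.size : Int)) :
    pvGetI (pvSetI v n x) n = x := by
  have hn : n.toNat < v.size := by omega
  simp [pvGetI, pvSetI, hn, Array.getD]

lemma pvGetI_setI_other (v : Array Int) (n m x : Int) (h0 : 0 ≤ n) (hm0 : 0 ≤ m)
    (hne : m ≠ n) : pvGetI (pvSetI v n x) m = pvGetI v m := by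
  unfold pvGetI pvSetI
  split
  · next h =>
    by_cases hm : m.toNat < v.size
    · have hne' : n.toNat ≠ m.toNat := by omega
      simp [Array.getD, hm, Array.size_set, hne']
    · simp [Array.getD, Array.size_set, hm]
  · rfl

lemma pvSetI_size (v : Array Int) (n x : Int) : (pvSetI v n x).size = v.size := by
  unfold pvSetI; split <;> simp

lemma pvVis_mark_self (vis : Array Bool) (n : Int) (h0 : 0 ≤ n) (h1 : n < (vis.size : Int)) :
    pvVis (pvMark vis n) n = true := by
  have hn : n.toNat < vis.size := by omega
  simp [pvVis, pvMark, hn, Array.getD]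

lemma pvVis_mark_other (vis : Array Bool) (n m : Int) (h0 : 0 ≤ n) (hm0 : 0 ≤ m)
    (hne : m ≠ n) : pvVis (pvMark vis n) m = pvVis vis m := by
  unfold pvVis pvMark
  split
  · next h =>
    by_cases hm : m.toNat < vis.size
    · have hne' : n.toNat ≠ m.toNat := by omega
      simp [Array.getD, hm, Array.size_set, hne']
    · simp [Array.getD, Array.size_set, hm]
  · rfl

lemma pvMark_size (vis : Array Bool) (n : Int) : (pvMark vis n).size = vis.size := by
  unfold pvMark; split <;> simp

-- the two guards compute the same test under pvRel
lemma pvOk_iff (v : Array Int) (vis : Array Bool) (hrel : pvRel v vis) (n : Int) :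
    pvOkA v n = pvOkB vis n := by
  obtain ⟨h1, h2, h3⟩ := hrel
  unfold pvOkA pvOkB
  by_cases hn0 : 0 ≤ n
  · by_cases hn1 : n < 100001
    · have := h3 n hn0 hn1
      simp only [hn0, hn1, decide_true, Bool.true_and]
      cases hvis : pvVis vis n <;> simp [hvis] at this ⊢ <;> simp [this]
    · simp [hn1]
  · simp [hn0]

-- pvRel survives a paired (label write, mark) at an in-range cell, new label ≠ -1
lemma pvRel_update (v : Array Int) (vis : Array Bool) (hrel : pvRel v vis)
    (n x : Int) (h0 : 0 ≤ n) (h1 : n < 100001) (hx : x ≠ -1) :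
    pvRel (pvSetI v n x) (pvMark vis n) := by
  obtain ⟨hs1, hs2, h3⟩ := hrel
  refine ⟨by rw [pvSetI_size, hs1], by rw [pvMark_size, hs2], ?_⟩
  intro m hm0 hm1
  by_cases hmn : m = n
  · subst hmn
    rw [pvGetI_setI_self v m x hm0 (by omega), pvVis_mark_self vis m hm0 (by omega)]
    simp [hx]
  · rw [pvGetI_setI_other v n m x h0 hm0 hmn, pvVis_mark_other vis n m h0 hm0 hmn]
    exact h3 m hm0 hm1

-- a write at a (-1)-cell does not change any cell holding a non-negative label
lemma pvGetI_setI_of_nonneg (v : Array Int) (n m x : Int) (h0 : 0 ≤ n) (hm0 : 0 ≤ m)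
    (hn : pvGetI v n = -1) (hm : 0 ≤ pvGetI v m) :
    pvGetI (pvSetI v n x) m = pvGetI v m := by
  have hne : m ≠ n := by intro h; rw [h, hn] at hm; omega
  exact pvGetI_setI_other v n m x h0 hm0 hne

lemma pvOkA_true (v : Array Int) (n : Int) (h : pvOkA v n = true) :
    0 ≤ n ∧ n < 100001 ∧ pvGetI v n = -1 := by
  simp [pvOkA] at h
  omega

-- one push of A corresponds to one push of B and preserves everything we track
lemma pvPush_sim (v : Array Int) (vis : Array Bool) (n lbl : Int)
    (hrel : pvRel v vis) (hl : 0 ≤ lbl) :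
    (pvPushB vis n lbl).1 = (pvPushA v n lbl).1.map (fun m => (m, lbl)) ∧
    pvRel (pvPushA v n lbl).2 (pvPushB vis n lbl).2 ∧
    (∀ m, 0 ≤ m → 0 ≤ pvGetI v m → pvGetI (pvPushA v n lbl).2 m = pvGetI v m) ∧
    (∀ m ∈ (pvPushA v n lbl).1, 0 ≤ m ∧ m < 100001 ∧ pvGetI (pvPushA v n lbl).2 m = lbl) := by
  unfold pvPushA pvPushB
  rw [← pvOk_iff v vis hrel]
  cases hg : pvOkA v n with
  | false => simpa using hrel
  | true =>
    obtain ⟨h0, h1, hm1⟩ := pvOkA_true v n hg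
    have hvs : v.size = 100001 := hrel.1
    simp only [if_true]
    refine ⟨rfl, pvRel_update v vis hrel n lbl h0 h1 (by omega), ?_, ?_⟩
    · intro m hm0 hmv
      exact pvGetI_setI_of_nonneg v n m lbl h0 hm0 hm1 hmv
    · intro m hm
      simp at hm
      subst hm
      exact ⟨h0, h1, pvGetI_setI_self v m lbl h0 (by rw [hvs]; exact_mod_cast h1)⟩

lemma bfsLoop_nil (e : Int) (fuel : Nat) (v : Array Int) : bfsLoop e fuel [] v = 0 := by
  cases fuel <;> rfl

lemma pvSim (e : Int) (fuel : Nat) :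
    ∀ (c : Int) (rest : List Int) (v : Array Int) (vis : Array Bool),
      pvRel v vis → pvQInv (c :: rest) v →
      bfsLoop e fuel (c :: rest) v =
        bfsChain e fuel c (pvGetI v c) (rest.map (fun c' => (c', pvGetI v c'))) vis := by
  induction fuel with
  | zero => intro c rest v vis _ _; rfl
  | succ fuel ih =>
    intro c rest v vis hrel hq
    obtain ⟨hc0, hc1, hcd⟩ := hq c (List.mem_cons_self)
    rw [bfsLoop, bfsChain]
    by_cases hce : c = e
    · simp [hce]
    · simp only [beq_iff_eq, hce, if_false]
      rw [← pvOk_iff v vis hrel]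
      -- the double 2*c : A pushes it in front with label d, B walks to it (or not)
      cases hg1 : pvOkA v (2*c) with
      | true =>
        obtain ⟨h20, h21, h2m⟩ := pvOkA_true v (2*c) hg1
        have hvs : v.size = 100001 := hrel.1
        set d := pvGetI v c with hd
        rw [show pvPushA v (2*c) d = ([2*c], pvSetI v (2*c) d) from by rw [pvPushA, if_pos hg1]]
        simp only [if_true]
        set v1 := pvSetI v (2*c) d with hv1
        set w1 := pvMark vis (2*c) with hw1
        have rel1 : pvRel v1 w1 := pvRel_update v vis hrel (2*c) d h20 h21 (by omega)
        have pres1 : ∀ m, 0 ≤ m → 0 ≤ pvGetI v m → pvGetI v1 m = pvGetI v m := by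
          intro m hm0 hmv; exact pvGetI_setI_of_nonneg v (2*c) m d h20 hm0 h2m hmv
        have g1 : pvGetI v1 (2*c) = d := by
          rw [hv1]
          exact pvGetI_setI_self v (2*c) d h20 (by rw [hvs]; exact_mod_cast h21)
        obtain ⟨q2, rel2, pres2, new2⟩ := pvPush_sim v1 w1 (c-1) (d+1) rel1 (by omega)
        set a1 := pvPushA v1 (c-1) (d+1) with ha1
        set p1 := pvPushB w1 (c-1) (d+1) with hp1
        obtain ⟨q3, rel3, pres3, new3⟩ := pvPush_sim a1.2 p1.2 (c+1) (d+1) rel2 (by omega)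
        set a2 := pvPushA a1.2 (c+1) (d+1) with ha2
        set p2 := pvPushB p1.2 (c+1) (d+1) with hp2
        -- values ≥ 0 survive all three writes
        have pres13 : ∀ m, 0 ≤ m → 0 ≤ pvGetI v m → pvGetI a2.2 m = pvGetI v m := by
          intro m hm0 hmv
          have e1 := pres1 m hm0 hmv
          have e2 := pres2 m hm0 (by rw [e1]; exact hmv)
          have e3 := pres3 m hm0 (by rw [e2, e1]; exact hmv)
          rw [e3, e2, e1]
        have g3 : pvGetI a2.2 (2*c) = d := by
          have e2 := pres2 (2*c) h20 (by rw [g1]; exact hcd)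
          have e3 := pres3 (2*c) h20 (by rw [e2, g1]; exact hcd)
          rw [e3, e2, g1]
        have new2' : ∀ m ∈ a1.1, 0 ≤ m ∧ m < 100001 ∧ pvGetI a2.2 m = d + 1 := by
          intro m hm
          obtain ⟨hm0, hm1, hv⟩ := new2 m hm
          exact ⟨hm0, hm1, by rw [pres3 m hm0 (by rw [hv]; omega), hv]⟩
        have qinv3 : pvQInv (2*c :: (rest ++ a1.1 ++ a2.1)) a2.2 := by
          intro m hm
          rcases List.mem_cons.1 hm with h | h
          · subst h; exact ⟨h20, h21, by rw [g3]; exact hcd⟩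
          rcases List.mem_append.1 h with h | h
          · rcases List.mem_append.1 h with h | h
            · obtain ⟨hm0, hm1, hmv⟩ := hq m (List.mem_cons_of_mem _ h)
              exact ⟨hm0, hm1, by rw [pres13 m hm0 hmv]; exact hmv⟩
            · obtain ⟨hm0, hm1, hv⟩ := new2' m h
              exact ⟨hm0, hm1, by rw [hv]; omega⟩
          · obtain ⟨hm0, hm1, hv⟩ := new3 m h
            exact ⟨hm0, hm1, by rw [hv]; omega⟩
        have key := ih (2*c) (rest ++ a1.1 ++ a2.1) a2.2 p2.2 rel3 qinv3
        have m1 : rest.map (fun c' => (c', pvGetI a2.2 c')) = rest.map (fun c' => (c', pvGetI v c')) := by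
          apply List.map_congr_left
          intro m hm
          obtain ⟨hm0, hm1, hmv⟩ := hq m (List.mem_cons_of_mem _ hm)
          simp only [Prod.mk.injEq, true_and]
          exact pres13 m hm0 hmv
        have m2 : a1.1.map (fun c' => (c', pvGetI a2.2 c')) = p1.1 := by
          rw [q2]
          apply List.map_congr_left
          intro m hm
          obtain ⟨hm0, hm1, hv⟩ := new2' m hm
          simp only [Prod.mk.injEq, true_and]
          exact hv
        have m3 : a2.1.map (fun c' => (c', pvGetI a2.2 c')) = p2.1 := by
          rw [q3]
          apply List.map_congr_left
          intro m hm
          obtain ⟨hm0, hm1, hv⟩ := new3 m hm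
          simp only [Prod.mk.injEq, true_and]
          exact hv
        have mapeq : (rest ++ a1.1 ++ a2.1).map (fun c' => (c', pvGetI a2.2 c')) =
            rest.map (fun c' => (c', pvGetI v c')) ++ p1.1 ++ p2.1 := by
          rw [List.map_append, List.map_append, m1, m2, m3]
        simp only [List.cons_append, List.nil_append]
        rw [key, g3, mapeq]
      | false =>
        set d := pvGetI v c with hd
        rw [show pvPushA v (2*c) d = ([], v) from by rw [pvPushA, if_neg (by simp [hg1])]]
        simp only [Bool.false_eq_true, if_false]
        obtain ⟨q2, rel2, pres2, new2⟩ := pvPush_sim v vis (c-1) (d+1) hrel (by omega)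
        set a1 := pvPushA v (c-1) (d+1) with ha1
        set p1 := pvPushB vis (c-1) (d+1) with hp1
        obtain ⟨q3, rel3, pres3, new3⟩ := pvPush_sim a1.2 p1.2 (c+1) (d+1) rel2 (by omega)
        set a2 := pvPushA a1.2 (c+1) (d+1) with ha2
        set p2 := pvPushB p1.2 (c+1) (d+1) with hp2
        have pres13 : ∀ m, 0 ≤ m → 0 ≤ pvGetI v m → pvGetI a2.2 m = pvGetI v m := by
          intro m hm0 hmv
          have e2 := pres2 m hm0 hmv
          have e3 := pres3 m hm0 (by rw [e2]; exact hmv)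
          rw [e3, e2]
        have new2' : ∀ m ∈ a1.1, 0 ≤ m ∧ m < 100001 ∧ pvGetI a2.2 m = d + 1 := by
          intro m hm
          obtain ⟨hm0, hm1, hv⟩ := new2 m hm
          exact ⟨hm0, hm1, by rw [pres3 m hm0 (by rw [hv]; omega), hv]⟩
        have qinv3 : pvQInv (rest ++ a1.1 ++ a2.1) a2.2 := by
          intro m hm
          rcases List.mem_append.1 hm with h | h
          · rcases List.mem_append.1 h with h | h
            · obtain ⟨hm0, hm1, hmv⟩ := hq m (List.mem_cons_of_mem _ h)
              exact ⟨hm0, hm1, by rw [pres13 m hm0 hmv]; exact hmv⟩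
            · obtain ⟨hm0, hm1, hv⟩ := new2' m h
              exact ⟨hm0, hm1, by rw [hv]; omega⟩
          · obtain ⟨hm0, hm1, hv⟩ := new3 m h
            exact ⟨hm0, hm1, by rw [hv]; omega⟩
        have m1 : rest.map (fun c' => (c', pvGetI a2.2 c')) = rest.map (fun c' => (c', pvGetI v c')) := by
          apply List.map_congr_left
          intro m hm
          obtain ⟨hm0, hm1, hmv⟩ := hq m (List.mem_cons_of_mem _ hm)
          simp only [Prod.mk.injEq, true_and]
          exact pres13 m hm0 hmv
        have m2 : a1.1.map (fun c' => (c', pvGetI a2.2 c')) = p1.1 := by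
          rw [q2]
          apply List.map_congr_left
          intro m hm
          obtain ⟨hm0, hm1, hv⟩ := new2' m hm
          simp only [Prod.mk.injEq, true_and]
          exact hv
        have m3 : a2.1.map (fun c' => (c', pvGetI a2.2 c')) = p2.1 := by
          rw [q3]
          apply List.map_congr_left
          intro m hm
          obtain ⟨hm0, hm1, hv⟩ := new3 m hm
          simp only [Prod.mk.injEq, true_and]
          exact hv
        have mapeq : (rest ++ a1.1 ++ a2.1).map (fun c' => (c', pvGetI a2.2 c')) =
            rest.map (fun c' => (c', pvGetI v c')) ++ p1.1 ++ p2.1 := by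
          rw [List.map_append, List.map_append, m1, m2, m3]
        rw [List.nil_append, ← mapeq]
        cases hL : rest ++ a1.1 ++ a2.1 with
        | nil => simp [bfsLoop_nil]
        | cons c' r' =>
          simp only [List.map_cons]
          exact ih c' r' a2.2 p2.2 rel3 (hL ▸ qinv3)

-- the initial arrays
lemma pvGetI_init (n : Int) : pvGetI (Array.replicate 100001 (-1 : Int)) n = -1 := by
  unfold pvGetI Array.getD
  split <;> simp

lemma pvVis_init (n : Int) : pvVis (Array.replicate 100001 false) n = false := by
  unfold pvVis Array.getD
  split <;> simp

-- ===== VERDICT (by name: the statement is the Claim_ definition above) =====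
theorem bfs_spec : Claim_equal_bfs := by
  unfold Claim_equal_bfs
  intro s e _ hpre
  obtain ⟨hs0, hs1, he0, he1⟩ := hpre
  unfold Spec_bfs bfs bfs_alt
  set v0 := pvSetI (Array.replicate 100001 (-1)) s 0 with hv0
  set vis0 := pvMark (Array.replicate 100001 false) s with hvis0
  have hsize : (Array.replicate 100001 (-1 : Int)).size = 100001 := by simp
  have g0 : pvGetI v0 s = 0 := by
    rw [hv0]
    exact pvGetI_setI_self _ s 0 hs0 (by rw [hsize]; exact_mod_cast (by omega : s < 100001))
  have rel0 : pvRel v0 vis0 := by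
    refine ⟨by rw [hv0, pvSetI_size]; simp, by rw [hvis0, pvMark_size]; simp, ?_⟩
    intro n hn0 hn1
    by_cases hns : n = s
    · subst hns
      rw [g0, hvis0]
      rw [pvVis_mark_self _ n hn0 (by simp; omega)]
      simp
    · rw [hv0, hvis0, pvGetI_setI_other _ s n 0 hs0 hn0 hns,
          pvVis_mark_other _ s n hs0 hn0 hns, pvGetI_init, pvVis_init]
      simp
  have hq0 : pvQInv [s] v0 := by
    intro m hm
    simp at hm
    subst hm
    exact ⟨hs0, by omega, by rw [g0]⟩
  have h := pvSim e 1000000 s [] v0 vis0 rel0 hq0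
  simpa [g0] using h
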